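-- pv_equiv track=rewrite | github.com/Vincent1334/arcade_swarm_unity | standalone/run.py | ordinary_attraction
-- ===== SOURCE A (Python) =====
-- def ordinary_attraction(ranges = [50, 100, 150], t = 25):
--     cmds = []
--     addition = ' -cmd "center attract" -cmd_t ' + str(t)
--     for r in ranges:
--         cmds.append('-name "ordinary attraction experiment_r{0}_t{1}" -d_x 500 -d_y 500'.format(r, t) + addition + ' -hum_r ' + str(r))
--         cmds.append('-name "ordinary attraction experiment_r{0}_t{1}" -d_x 100 -d_y 500'.format(r, t) + addition + ' -hum_r ' + str(r))
--         cmds.append('-name "ordinary attraction experiment_r{0}_t{1}" -d_x 300 -d_y 100'.format(r, t) + addition + ' -hum_r ' + str(r))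
--     return cmds
-- ===== SOURCE B (Python) =====
-- def ordinary_attraction(ranges = [50, 100, 150], t = 25):
--     configs = [(500, 500), (100, 500), (300, 100)]
--     return ['-name "ordinary attraction experiment_r{0}_t{1}" -d_x {2} -d_y {3}'.format(r, t, dx, dy)
--             + ' -cmd "center attract" -cmd_t ' + str(t) + ' -hum_r ' + str(r)
--             for r in ranges for dx, dy in configs]
-- ===== Notes on version B (the rewrite author's own statement) =====
-- stated objective: simpler
-- what changed: Replaces the accumulator loop with three near-duplicate append lines by a lookup table of the three (d_x,d_y) configurations and a single nested comprehension with one shared format string.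
import Mathlib
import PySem

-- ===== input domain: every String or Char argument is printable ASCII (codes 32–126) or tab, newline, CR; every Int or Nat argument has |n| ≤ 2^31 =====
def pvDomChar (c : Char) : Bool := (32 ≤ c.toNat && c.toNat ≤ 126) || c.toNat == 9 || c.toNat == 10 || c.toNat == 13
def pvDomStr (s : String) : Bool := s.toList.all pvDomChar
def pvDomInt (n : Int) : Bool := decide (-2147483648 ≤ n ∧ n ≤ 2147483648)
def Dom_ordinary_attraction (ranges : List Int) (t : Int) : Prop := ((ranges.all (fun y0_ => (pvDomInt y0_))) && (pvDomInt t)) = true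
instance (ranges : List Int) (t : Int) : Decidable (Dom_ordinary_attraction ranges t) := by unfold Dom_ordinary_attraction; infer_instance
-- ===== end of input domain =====

-- B replaces A's loop of three near-duplicate append lines by a table of the three
-- (d_x, d_y) configurations and one nested comprehension (objective: simpler).

-- ===== PORT A =====
-- literal port: accumulator list, three appends per r, same concatenations as the Python
def ordinary_attraction (ranges : List Int) (t : Int) : List String :=
  let addition := " -cmd \"center attract\" -cmd_t " ++ PySem.Int.toStr t
  ranges.foldl (fun cmds r =>
    let cmds := cmds ++ ["-name \"ordinary attraction experiment_r" ++ PySem.Int.toStr r ++ "_t" ++ PySem.Int.toStr t ++ "\" -d_x 500 -d_y 500" ++ addition ++ " -hum_r " ++ PySem.Int.toStr r]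
    let cmds := cmds ++ ["-name \"ordinary attraction experiment_r" ++ PySem.Int.toStr r ++ "_t" ++ PySem.Int.toStr t ++ "\" -d_x 100 -d_y 500" ++ addition ++ " -hum_r " ++ PySem.Int.toStr r]
    let cmds := cmds ++ ["-name \"ordinary attraction experiment_r" ++ PySem.Int.toStr r ++ "_t" ++ PySem.Int.toStr t ++ "\" -d_x 300 -d_y 100" ++ addition ++ " -hum_r " ++ PySem.Int.toStr r]
    cmds) []

-- ===== PORT B =====
-- literal port of Source B: config table + nested comprehension (flatMap/map), one format string
def ordinary_attraction_alt (ranges : List Int) (t : Int) : List String :=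
  let configs : List (Int × Int) := [(500, 500), (100, 500), (300, 100)]
  ranges.flatMap (fun r => configs.map (fun c =>
    "-name \"ordinary attraction experiment_r" ++ PySem.Int.toStr r ++ "_t" ++ PySem.Int.toStr t
      ++ "\" -d_x " ++ PySem.Int.toStr c.1 ++ " -d_y " ++ PySem.Int.toStr c.2
      ++ " -cmd \"center attract\" -cmd_t " ++ PySem.Int.toStr t ++ " -hum_r " ++ PySem.Int.toStr r))

-- ===== PRECONDITION & SPEC =====
def Spec_ordinary_attraction (ranges : List Int) (t : Int) (out : List String) : Prop := out = ordinary_attraction_alt ranges t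
instance (ranges : List Int) (t : Int) (out : List String) : Decidable (Spec_ordinary_attraction ranges t out) := by unfold Spec_ordinary_attraction; infer_instance

-- ===== CLAIM (what is proved, stated in full; the proofs are below) =====
def Claim_equal_ordinary_attraction : Prop := ∀ (ranges : List Int) (t : Int), Dom_ordinary_attraction ranges t → Spec_ordinary_attraction ranges t (ordinary_attraction ranges t)

-- ===== LEMMAS AND PROOFS =====

-- A's fold step appends the same three strings B's inner map produces for r.
theorem ordinary_attraction_acc (ranges : List Int) (t : Int) (acc : List String) :
    (ranges.foldl (fun cmds r =>
      let cmds := cmds ++ ["-name \"ordinary attraction experiment_r" ++ PySem.Int.toStr r ++ "_t" ++ PySem.Int.toStr t ++ "\" -d_x 500 -d_y 500" ++ (" -cmd \"center attract\" -cmd_t " ++ PySem.Int.toStr t) ++ " -hum_r " ++ PySem.Int.toStr r]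
      let cmds := cmds ++ ["-name \"ordinary attraction experiment_r" ++ PySem.Int.toStr r ++ "_t" ++ PySem.Int.toStr t ++ "\" -d_x 100 -d_y 500" ++ (" -cmd \"center attract\" -cmd_t " ++ PySem.Int.toStr t) ++ " -hum_r " ++ PySem.Int.toStr r]
      let cmds := cmds ++ ["-name \"ordinary attraction experiment_r" ++ PySem.Int.toStr r ++ "_t" ++ PySem.Int.toStr t ++ "\" -d_x 300 -d_y 100" ++ (" -cmd \"center attract\" -cmd_t " ++ PySem.Int.toStr t) ++ " -hum_r " ++ PySem.Int.toStr r]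
      cmds) acc) = acc ++ ordinary_attraction_alt ranges t := by
  induction ranges generalizing acc with
  | nil => simp [ordinary_attraction_alt]
  | cons r rs ih =>
    rw [List.foldl_cons, ih]
    simp only [ordinary_attraction_alt, List.flatMap_cons, List.map_cons, List.map_nil,
      List.append_assoc, List.cons_append, List.nil_append,
      List.append_cancel_left_eq, List.cons.injEq]
    refine ⟨?_, ?_, ?_, trivial⟩
    · rw [show ("\" -d_x 500 -d_y 500" : String) = "\" -d_x " ++ PySem.Int.toStr 500 ++ " -d_y " ++ PySem.Int.toStr 500 from by decide]
      simp [String.append_assoc]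
    · rw [show ("\" -d_x 100 -d_y 500" : String) = "\" -d_x " ++ PySem.Int.toStr 100 ++ " -d_y " ++ PySem.Int.toStr 500 from by decide]
      simp [String.append_assoc]
    · rw [show ("\" -d_x 300 -d_y 100" : String) = "\" -d_x " ++ PySem.Int.toStr 300 ++ " -d_y " ++ PySem.Int.toStr 100 from by decide]
      simp [String.append_assoc]

-- ===== VERDICT (by name: the statement is the Claim_ definition above) =====
theorem ordinary_attraction_spec : Claim_equal_ordinary_attraction := by
  intro ranges t _
  unfold Spec_ordinary_attraction ordinary_attraction
  simpa using ordinary_attraction_acc ranges t []
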